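-- pv_equiv track=rewrite | github.com/Balaji-Kondasani/gfg_potd | Week-4/maximum_people_visible_in_a_line.py | findNgl
-- ===== SOURCE A (Python) =====
-- def findNgl(arr):
--     result=[-1]*len(arr)
--     stack=[]
--
--     for i in range(len(arr)-1,-1,-1):
--         while stack and arr[stack[-1]]<=arr[i]:
--             index=stack.pop()
--             result[index]=i
--         stack.append(i)
--     return result
-- ===== SOURCE B (Python) =====
-- def findNgl(arr):
--     # simpler decomposition: for each position, scan left for the nearest >= element
--     n = len(arr)
--     res = []
--     for j in range(n):
--         k = -1
--         for i in range(j - 1, -1, -1):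
--             if arr[i] >= arr[j]:
--                 k = i
--                 break
--         res.append(k)
--     return res
-- ===== Notes on version B (the rewrite author's own statement) =====
-- stated objective: simpler
-- what changed: Replaced the backward monotonic-stack resolve-on-pop algorithm by a direct forward pass that, for each position, scans left for the nearest greater-or-equal element.
import Mathlib
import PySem

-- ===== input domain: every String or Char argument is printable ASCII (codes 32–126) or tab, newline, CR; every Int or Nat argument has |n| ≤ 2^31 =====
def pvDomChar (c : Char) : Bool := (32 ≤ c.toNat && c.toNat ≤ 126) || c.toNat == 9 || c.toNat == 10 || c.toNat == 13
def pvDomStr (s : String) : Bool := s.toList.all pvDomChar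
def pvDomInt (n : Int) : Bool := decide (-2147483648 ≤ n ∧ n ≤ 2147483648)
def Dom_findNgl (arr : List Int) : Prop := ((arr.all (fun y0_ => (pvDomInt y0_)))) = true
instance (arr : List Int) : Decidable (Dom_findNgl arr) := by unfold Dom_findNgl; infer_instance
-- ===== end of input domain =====

-- B replaces A's backward monotonic stack by a plain left scan per index (simpler, not faster).


-- ===== PORT A =====
-- the while-loop: pop while stack nonempty and arr[stack[-1]] <= arr[i]; stack head = Python's stack[-1]
def findNglPop (arr : List Int) (i : Int) : List Int → List Int → List Int × List Int
  | result, [] => (result, [])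
  | result, t :: rest =>
      if PySem.List.pyGetD arr t 0 ≤ PySem.List.pyGetD arr i 0 then
        findNglPop arr i (PySem.List.pySetD result t i) rest
      else (result, t :: rest)

def findNgl (arr : List Int) : List Int :=
  (((PySem.List.pyRange ((arr.length : Int) - 1) (-1) (-1)).foldl
    (fun (st : List Int × List Int) i =>
      let p := findNglPop arr i st.1 st.2
      (p.1, i :: p.2))
    (List.replicate arr.length (-1), []))).1

-- ===== PORT B =====
-- inner 'for i in range(j-1,-1,-1): if arr[i] >= arr[j]: k = i; break' with k initialized -1
def findNglScan (arr : List Int) (vj : Int) : List Int → Int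
  | [] => -1
  | i :: rest =>
      if vj ≤ PySem.List.pyGetD arr i 0 then i else findNglScan arr vj rest

def findNgl_alt (arr : List Int) : List Int :=
  (PySem.List.pyRange 0 (arr.length : Int) 1).foldl
    (fun res j =>
      res ++ [findNglScan arr (PySem.List.pyGetD arr j 0) (PySem.List.pyRange (j - 1) (-1) (-1))])
    []

-- ===== PRECONDITION & SPEC =====
def Spec_findNgl (arr : List Int) (out : List Int) : Prop := out = findNgl_alt arr
instance (arr : List Int) (out : List Int) : Decidable (Spec_findNgl arr out) := by unfold Spec_findNgl; infer_instance

-- ===== CLAIM (what is proved, stated in full; the proofs are below) =====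
def Claim_equal_findNgl : Prop := ∀ (arr : List Int), Dom_findNgl arr → Spec_findNgl arr (findNgl arr)

-- ===== LEMMAS AND PROOFS =====

-- the common specification: nearest index k < j with arr[k] >= arr[j], else -1
def specF (arr : List Int) (v : Int) : Nat → Int
  | 0 => -1
  | j + 1 => if v ≤ arr.getD j 0 then (j : Int) else specF arr v j

def specNgl (arr : List Int) (j : Nat) : Int := specF arr (arr.getD j 0) j

-- "no k in [i, j) has arr[k] >= arr[j]"
def unres (arr : List Int) (i j : Nat) : Bool :=
  (List.range' i (j - i)).all (fun k => decide (arr.getD k 0 < arr.getD j 0))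

def stackOf (arr : List Int) (i : Nat) : List Nat :=
  (List.range' i (arr.length - i)).filter (unres arr i)

-- Nat-indexed model of A's loop
def popM (arr : List Int) (i : Nat) : List Int → List Nat → List Int × List Nat
  | r, [] => (r, [])
  | r, t :: rest =>
      if arr.getD t 0 ≤ arr.getD i 0 then popM arr i (r.set t (i : Int)) rest
      else (r, t :: rest)

def runM (arr : List Int) : Nat → List Int × List Nat
  | 0 => (List.replicate arr.length (-1), [])
  | m + 1 =>
      let p := runM arr m
      let q := popM arr (arr.length - 1 - m) p.1 p.2
      (q.1, (arr.length - 1 - m) :: q.2)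

theorem unres_iff (arr : List Int) (i j : Nat) :
    unres arr i j = true ↔ ∀ k, i ≤ k → k < j → arr.getD k 0 < arr.getD j 0 := by
  unfold unres
  simp only [List.all_eq_true, List.mem_range'_1, decide_eq_true_eq]
  constructor
  · intro h k hk1 hk2
    exact h k ⟨hk1, by omega⟩
  · rintro h k ⟨hk1, hk2⟩
    exact h k hk1 (by omega)

theorem unres_self (arr : List Int) (i : Nat) : unres arr i i = true := by
  simp [unres]

theorem unres_succ (arr : List Int) {i j : Nat} (h : i < j) :
    unres arr i j = (unres arr (i + 1) j && decide (arr.getD i 0 < arr.getD j 0)) := by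
  unfold unres
  rw [show j - i = (j - (i + 1)) + 1 by omega, List.range'_succ, List.all_cons, Bool.and_comm]

theorem specF_of (arr : List Int) (v : Int) :
    ∀ {m i : Nat}, i < m → v ≤ arr.getD i 0 →
      (∀ k, i < k → k < m → arr.getD k 0 < v) → specF arr v m = (i : Int) := by
  intro m
  induction m with
  | zero => omega
  | succ m ih =>
      intro i h1 h2 h3
      by_cases hi : i = m
      · subst hi; simp only [specF, if_pos h2]
      · have hlt : arr.getD m 0 < v := h3 m (by omega) (by omega)
        have : ¬ v ≤ arr.getD m 0 := by omega
        simp only [specF, if_neg this]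
        exact ih (by omega) h2 (fun k hk1 hk2 => h3 k hk1 (by omega))

theorem specF_neg (arr : List Int) (v : Int) :
    ∀ m, (∀ k, k < m → arr.getD k 0 < v) → specF arr v m = -1 := by
  intro m
  induction m with
  | zero => simp [specF]
  | succ m ih =>
      intro h
      have : ¬ v ≤ arr.getD m 0 := by have := h m (by omega); omega
      simp only [specF, if_neg this]
      exact ih (fun k hk => h k (by omega))

theorem mem_stackOf {arr : List Int} {i t : Nat} :
    t ∈ stackOf arr i ↔ i ≤ t ∧ t < arr.length ∧ unres arr i t = true := by
  unfold stackOf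
  simp only [List.mem_filter, List.mem_range'_1]
  constructor
  · rintro ⟨⟨h1, h2⟩, h3⟩
    exact ⟨h1, by omega, h3⟩
  · rintro ⟨h1, h2, h3⟩
    exact ⟨⟨h1, by omega⟩, h3⟩

theorem pairwise_stackOf (arr : List Int) (i : Nat) :
    (stackOf arr i).Pairwise (fun a b => arr.getD a 0 < arr.getD b 0) := by
  have hlt : (stackOf arr i).Pairwise (· < ·) :=
    (List.pairwise_lt_range' 1).sublist List.filter_sublist
  refine hlt.imp_of_mem ?_
  intro a b ha hb hab
  rcases mem_stackOf.mp ha with ⟨ha1, _, _⟩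
  rcases mem_stackOf.mp hb with ⟨hb1, _, hb3⟩
  exact (unres_iff arr i b).mp hb3 a ha1 hab

theorem stackOf_top (arr : List Int) : stackOf arr arr.length = [] := by
  simp [stackOf]

theorem stackOf_step (arr : List Int) {i : Nat} (h : i < arr.length) :
    stackOf arr i =
      i :: (stackOf arr (i + 1)).filter (fun t => decide (arr.getD i 0 < arr.getD t 0)) := by
  unfold stackOf
  rw [show arr.length - i = (arr.length - (i + 1)) + 1 by omega, List.range'_succ,
    List.filter_cons, List.filter_filter]
  simp only [unres_self]
  rw [if_pos trivial]
  congr 1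
  apply List.filter_congr
  intro t ht
  have hti : i < t := by
    have := List.mem_range'_1.mp ht; omega
  rw [unres_succ arr hti, Bool.and_comm]

theorem popM_length (arr : List Int) (i : Nat) :
    ∀ (s : List Nat) (r : List Int), (popM arr i r s).1.length = r.length := by
  intro s
  induction s with
  | nil => intro r; simp [popM]
  | cons t rest ih =>
      intro r
      simp only [popM]
      split
      · rw [ih]; simp
      · rfl

theorem popM_char (arr : List Int) (i : Nat) :
    ∀ (s : List Nat) (r : List Int),
      s.Pairwise (fun a b => arr.getD a 0 < arr.getD b 0) →
      (∀ t ∈ s, t < r.length) →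
      (popM arr i r s).2 = s.filter (fun t => decide (arr.getD i 0 < arr.getD t 0)) ∧
      ∀ j : Nat, (popM arr i r s).1.getD j 0 =
        if j ∈ s ∧ arr.getD j 0 ≤ arr.getD i 0 then (i : Int) else r.getD j 0 := by
  intro s
  induction s with
  | nil => intro r _ _; simp [popM]
  | cons t rest ih =>
      intro r hp hlen
      rw [List.pairwise_cons] at hp
      obtain ⟨ht, hrest⟩ := hp
      have htnotm : t ∉ rest := fun hm => absurd (ht t hm) (by omega)
      by_cases hc : arr.getD t 0 ≤ arr.getD i 0
      · simp only [popM, if_pos hc]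
        have hlen' : ∀ u ∈ rest, u < (r.set t (i : Int)).length := by
          intro u hu; rw [List.length_set]; exact hlen u (List.mem_cons_of_mem _ hu)
        obtain ⟨h2, h1⟩ := ih (r.set t (i : Int)) hrest hlen'
        refine ⟨?_, ?_⟩
        · rw [h2, List.filter_cons]
          have hnot : ¬ (decide (arr.getD i 0 < arr.getD t 0) = true) := by
            simp only [decide_eq_true_eq]; omega
          rw [if_neg hnot]
        · intro j
          rw [h1 j]
          by_cases hj : j ∈ rest ∧ arr.getD j 0 ≤ arr.getD i 0
          · rw [if_pos hj, if_pos ⟨List.mem_cons_of_mem _ hj.1, hj.2⟩]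
          · rw [if_neg hj]
            by_cases hjt : j = t
            · subst hjt
              rw [if_pos ⟨List.mem_cons_self, hc⟩]
              have hlt : j < r.length := hlen j List.mem_cons_self
              rw [List.getD_eq_getElem?_getD, List.getElem?_set_self (by simpa using hlt)]
              simp
            · have : ¬ (j ∈ t :: rest ∧ arr.getD j 0 ≤ arr.getD i 0) := by
                rintro ⟨hm, hle⟩
                rcases List.mem_cons.mp hm with h | h
                · exact hjt h
                · exact hj ⟨h, hle⟩
              rw [if_neg this, List.getD_eq_getElem?_getD, List.getElem?_set_ne (by omega)]
              rw [List.getD_eq_getElem?_getD]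
      · simp only [popM, if_neg hc]
        refine ⟨?_, ?_⟩
        · rw [List.filter_cons]
          have hit : arr.getD i 0 < arr.getD t 0 := by omega
          have hall : rest.filter (fun u => decide (arr.getD i 0 < arr.getD u 0)) = rest := by
            apply List.filter_eq_self.mpr
            intro u hu
            have := ht u hu
            simp only [decide_eq_true_eq]
            omega
          rw [if_pos (by simpa using hit), hall]
        · intro j
          have : ¬ (j ∈ t :: rest ∧ arr.getD j 0 ≤ arr.getD i 0) := by
            rintro ⟨hm, hle⟩
            rcases List.mem_cons.mp hm with h | h
            · subst h; exact hc hle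
            · have := ht j h; omega
          rw [if_neg this]

theorem runM_inv (arr : List Int) :
    ∀ m, m ≤ arr.length →
      (runM arr m).1.length = arr.length ∧
      (runM arr m).2 = stackOf arr (arr.length - m) ∧
      ∀ j, j < arr.length →
        (runM arr m).1.getD j 0 =
          if j < arr.length - m ∨ unres arr (arr.length - m) j = true then -1
          else specNgl arr j := by
  intro m
  induction m with
  | zero =>
      intro _
      refine ⟨by simp [runM], by simp [runM, stackOf_top], ?_⟩
      intro j hj
      simp only [runM, Nat.sub_zero]
      rw [if_pos (Or.inl hj)]
      rw [List.getD_eq_getElem?_getD, List.getElem?_replicate]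
      simp [hj]
  | succ m ih =>
      intro hm
      obtain ⟨hlen, hs, hr⟩ := ih (by omega)
      set n := arr.length with hn
      set i := n - 1 - m with hi
      have hii : n - m = i + 1 := by omega
      have hi1 : n - (m + 1) = i := by omega
      have hiltn : i < n := by omega
      have hpair : (runM arr m).2.Pairwise (fun a b => arr.getD a 0 < arr.getD b 0) := by
        rw [hs]; exact pairwise_stackOf arr _
      have hblen : ∀ t ∈ (runM arr m).2, t < (runM arr m).1.length := by
        intro t htm
        rw [hs] at htm
        rw [hlen]
        exact (mem_stackOf.mp htm).2.1
      obtain ⟨h2, h1⟩ := popM_char arr i (runM arr m).2 (runM arr m).1 hpair hblen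
      have hstack : (runM arr (m + 1)).2 = stackOf arr (n - (m + 1)) := by
        show (i : Nat) :: (popM arr i (runM arr m).1 (runM arr m).2).2 = _
        rw [h2, hs, hii, hi1, stackOf_step arr hiltn]
      refine ⟨by show (popM arr i _ _).1.length = n; rw [popM_length, hlen], hstack, ?_⟩
      intro j hj
      show (popM arr i (runM arr m).1 (runM arr m).2).1.getD j 0 = _
      rw [h1 j, hs, hii, hi1]
      by_cases hjlt : j < i
      · have hnm : ¬ j ∈ stackOf arr (i + 1) := by
          intro hmem; exact absurd (mem_stackOf.mp hmem).1 (by omega)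
        rw [if_neg (by rintro ⟨hmem, _⟩; exact hnm hmem), hr j hj, hii]
        rw [if_pos (Or.inl (by omega)), if_pos (Or.inl hjlt)]
      · by_cases hje : j = i
        · have hnm : ¬ j ∈ stackOf arr (i + 1) := by
            intro hmem; exact absurd (mem_stackOf.mp hmem).1 (by omega)
          rw [if_neg (by rintro ⟨hmem, _⟩; exact hnm hmem), hr j hj, hii]
          rw [if_pos (Or.inl (by omega)),
            if_pos (Or.inr (by rw [hje]; exact unres_self arr i))]
        · have hij : i < j := by omega
          by_cases hu : unres arr (i + 1) j = true
          · have hmem : j ∈ stackOf arr (i + 1) := mem_stackOf.mpr ⟨by omega, hj, hu⟩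
            by_cases hle : arr.getD j 0 ≤ arr.getD i 0
            · rw [if_pos ⟨hmem, hle⟩]
              have hunot : ¬ (j < i ∨ unres arr i j = true) := by
                rintro (h | h)
                · omega
                · rw [unres_succ arr hij, hu] at h
                  simp only [Bool.true_and, decide_eq_true_eq] at h
                  omega
              rw [if_neg hunot]
              symm
              apply specF_of arr _ hij hle
              intro k hk1 hk2
              exact (unres_iff arr (i + 1) j).mp hu k (by omega) hk2
            · rw [if_neg (by rintro ⟨_, h⟩; exact hle h)]
              rw [hr j hj, hii, if_pos (Or.inr hu)]
              have : unres arr i j = true := by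
                rw [unres_succ arr hij, hu]
                simp only [Bool.true_and, decide_eq_true_eq]
                omega
              rw [if_pos (Or.inr this)]
          · have hnm : ¬ j ∈ stackOf arr (i + 1) := by
              intro hmem; exact hu (mem_stackOf.mp hmem).2.2
            rw [if_neg (by rintro ⟨hmem, _⟩; exact hnm hmem), hr j hj, hii]
            have hnu : unres arr i j ≠ true := by
              rw [unres_succ arr hij]
              simp [hu]
            rw [if_neg (by rintro (h | h); omega; exact hu h),
              if_neg (by rintro (h | h); omega; exact hnu h)]

theorem pop_corr (arr : List Int) (i : Nat) :
    ∀ (s : List Nat) (r : List Int),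
      findNglPop arr (i : Int) r (s.map (fun t : Nat => (t : Int))) =
        ((popM arr i r s).1, (popM arr i r s).2.map (fun t : Nat => (t : Int))) := by
  intro s
  induction s with
  | nil => intro r; simp [findNglPop, popM]
  | cons t rest ih =>
      intro r
      simp only [List.map_cons, findNglPop, popM, PySem.List.pyGetD_natCast,
        PySem.List.pySetD_natCast]
      split
      · exact ih (r.set t (i : Int))
      · rfl

theorem fold_corr (arr : List Int) :
    ∀ m, m ≤ arr.length →
      ((List.range m).map (fun k : Nat => (arr.length : Int) - 1 - (k : Int))).foldl
        (fun (st : List Int × List Int) i =>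
          let p := findNglPop arr i st.1 st.2
          (p.1, i :: p.2))
        (List.replicate arr.length (-1), []) =
      ((runM arr m).1, (runM arr m).2.map (fun t : Nat => (t : Int))) := by
  intro m
  induction m with
  | zero => intro _; simp [runM]
  | succ m ih =>
      intro hm
      rw [List.range_succ, List.map_append, List.foldl_append, ih (by omega)]
      simp only [List.map_cons, List.map_nil, List.foldl_cons, List.foldl_nil]
      have hcast : (arr.length : Int) - 1 - (m : Int) = ((arr.length - 1 - m : Nat) : Int) := by
        omega
      rw [hcast, pop_corr]
      simp [runM]

theorem findNgl_eq_model (arr : List Int) :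
    findNgl arr = (runM arr arr.length).1 := by
  unfold findNgl
  rw [PySem.List.pyRange_neg_one]
  have : ((arr.length : Int) - 1 - (-1)).toNat = arr.length := by omega
  rw [this, fold_corr arr arr.length (le_refl _)]

theorem scan_eq_spec (arr : List Int) (v : Int) :
    ∀ j : Nat, findNglScan arr v (PySem.List.pyRange ((j : Int) - 1) (-1) (-1)) = specF arr v j := by
  intro j
  induction j with
  | zero =>
      rw [show ((0 : Nat) : Int) - 1 = -1 by omega, PySem.List.pyRange_neg_one_eq_nil (by omega)]
      rfl
  | succ j ih =>
      rw [show ((j + 1 : Nat) : Int) - 1 = (j : Int) by omega,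
        PySem.List.pyRange_neg_one_cons (by omega)]
      simp only [findNglScan, PySem.List.pyGetD_natCast, specF]
      split
      · rfl
      · exact ih

theorem alt_eq_map (arr : List Int) :
    findNgl_alt arr = (List.range arr.length).map (specNgl arr) := by
  unfold findNgl_alt
  rw [PySem.List.pyRange_zero_natCast]
  rw [List.foldl_map]
  rw [PySem.List.foldl_append_singleton_eq_map]
  apply List.map_congr_left
  intro j hj
  rw [PySem.List.pyGetD_natCast]
  exact scan_eq_spec arr (arr.getD j 0) j

-- ===== VERDICT (by name: the statement is the Claim_ definition above) =====
theorem findNgl_spec : Claim_equal_findNgl := by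
  intro arr _
  unfold Spec_findNgl
  rw [findNgl_eq_model, alt_eq_map]
  obtain ⟨hlen, _, hr⟩ := runM_inv arr arr.length (le_refl _)
  apply List.ext_getElem
  · simp [hlen]
  · intro j hj1 hj2
    rw [hlen] at hj1
    have hget : (runM arr arr.length).1[j] = (runM arr arr.length).1.getD j 0 := by
      rw [List.getD_eq_getElem _ _ (by omega)]
    rw [hget, hr j hj1]
    have hrange : ((List.range arr.length).map (specNgl arr))[j] = specNgl arr j := by
      simp
    rw [hrange]
    by_cases hu : unres arr (arr.length - arr.length) j = true
    · rw [if_pos (Or.inr hu)]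
      symm
      apply specF_neg
      intro k hk
      exact (unres_iff arr _ j).mp hu k (by omega) hk
    · rw [if_neg (by rintro (h | h); omega; exact hu h)]
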